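-- pv_equiv track=rewrite | github.com/Akimkj/portfolio-UFMA | Algoritmo1/exercícios/ex029.py | temPositivosENegativos
-- ===== SOURCE A (Python) =====
-- def temPositivosENegativos(matriz):
--     QuantPositivos = 0
--     QuantNegativos = 0
--     for i in range(len(matriz)):
--         for j in range(len(matriz[i])):
--             if matriz[i][j] > 0:
--                 QuantPositivos += 1
--             if matriz[i][j] < 0:
--                 QuantNegativos += 1
--             if (QuantNegativos >= 1) and (QuantPositivos >= 1):
--                 return True
--     return False
-- ===== SOURCE B (Python) =====
-- def temPositivosENegativos(matriz):
--     return any(x > 0 for row in matriz for x in row) and \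
--            any(x < 0 for row in matriz for x in row)
-- ===== Notes on version B (the rewrite author's own statement) =====
-- stated objective: idiomatic
-- what changed: Replaces the index-based nested loop with interleaved positive/negative counters and an early return by two independent short-circuiting any() existence scans combined with 'and'.
import Mathlib
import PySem

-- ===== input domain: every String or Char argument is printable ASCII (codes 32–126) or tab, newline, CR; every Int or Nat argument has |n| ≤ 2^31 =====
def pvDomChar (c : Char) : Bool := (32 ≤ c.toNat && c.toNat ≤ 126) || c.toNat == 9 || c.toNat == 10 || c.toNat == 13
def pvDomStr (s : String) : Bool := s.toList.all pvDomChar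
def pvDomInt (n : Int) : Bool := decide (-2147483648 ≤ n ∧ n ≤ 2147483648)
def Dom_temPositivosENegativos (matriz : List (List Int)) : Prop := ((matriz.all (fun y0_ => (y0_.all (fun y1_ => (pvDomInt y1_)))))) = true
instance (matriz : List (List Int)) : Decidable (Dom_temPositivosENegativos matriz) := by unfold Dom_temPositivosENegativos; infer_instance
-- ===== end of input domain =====

-- B replaces A's interleaved counters + early return by two independent any-scans; objective: idiomatic.

-- ===== PORT A =====
-- inner 'for j' loop: processes one row cell by cell with the two counters;
-- 'none' means the Python hit 'return True' inside the loop
def pvCellsA : List Int → Int → Int → Option (Int × Int)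
  | [], p, n => some (p, n)
  | x :: xs, p, n =>
    let p := if x > 0 then p + 1 else p
    let n := if x < 0 then n + 1 else n
    if n ≥ 1 ∧ p ≥ 1 then none else pvCellsA xs p n

-- outer 'for i' loop over the rows
def pvRowsA : List (List Int) → Int → Int → Bool
  | [], _, _ => false
  | r :: rs, p, n =>
    match pvCellsA r p n with
    | none => true
    | some (p', n') => pvRowsA rs p' n'

def temPositivosENegativos (matriz : List (List Int)) : Bool :=
  pvRowsA matriz 0 0

-- ===== PORT B =====
def temPositivosENegativos_alt (matriz : List (List Int)) : Bool :=
  (matriz.any (fun row => row.any (fun x => x > 0))) &&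
  (matriz.any (fun row => row.any (fun x => x < 0)))

-- ===== PRECONDITION & SPEC =====
def Spec_temPositivosENegativos (matriz : List (List Int)) (out : Bool) : Prop := out = temPositivosENegativos_alt matriz
instance (matriz : List (List Int)) (out : Bool) : Decidable (Spec_temPositivosENegativos matriz out) := by unfold Spec_temPositivosENegativos; infer_instance

-- ===== CLAIM (what is proved, stated in full; the proofs are below) =====
def Claim_equal_temPositivosENegativos : Prop := ∀ (matriz : List (List Int)), Dom_temPositivosENegativos matriz → Spec_temPositivosENegativos matriz (temPositivosENegativos matriz)

-- ===== LEMMAS AND PROOFS =====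

-- characterisation of the inner loop: either it early-returns (both kinds now seen),
-- or it ends with nonnegative counters whose "≥ 1" facts are the existence facts, not both holding
theorem pvCellsA_spec (xs : List Int) (p n : Int) (hp : 0 ≤ p) (hn : 0 ≤ n)
    (hpn : p = 0 ∨ n = 0) :
    (pvCellsA xs p n = none ∧ (1 ≤ p ∨ ∃ y ∈ xs, 0 < y) ∧ (1 ≤ n ∨ ∃ y ∈ xs, y < 0))
    ∨ (∃ p' n', pvCellsA xs p n = some (p', n') ∧ 0 ≤ p' ∧ 0 ≤ n' ∧ (p' = 0 ∨ n' = 0) ∧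
        (1 ≤ p' ↔ (1 ≤ p ∨ ∃ y ∈ xs, 0 < y)) ∧
        (1 ≤ n' ↔ (1 ≤ n ∨ ∃ y ∈ xs, y < 0))) := by
  induction xs generalizing p n with
  | nil =>
    right
    exact ⟨p, n, rfl, hp, hn, hpn, by simp, by simp⟩
  | cons x xs ih =>
    simp only [pvCellsA, List.mem_cons, exists_eq_or_imp]
    rcases lt_trichotomy x 0 with hx | hx | hx
    · -- x < 0 : negative counter bumps
      simp only [if_neg (by omega : ¬ x > 0), if_pos hx]
      by_cases hP : 1 ≤ p
      · rw [if_pos ⟨by omega, hP⟩]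
        exact Or.inl ⟨rfl, Or.inl hP, Or.inr (Or.inl hx)⟩
      · rw [if_neg (by omega)]
        rcases ih p (n + 1) hp (by omega) (Or.inl (by omega)) with
          ⟨h1, h2, h3⟩ | ⟨p', n', h1, h2, h3, h4, h5, h6⟩
        · exact Or.inl ⟨h1, h2.imp id Or.inr, Or.inr (Or.inl hx)⟩
        · refine Or.inr ⟨p', n', h1, h2, h3, h4, ?_, ?_⟩
          · constructor
            · intro h; exact (h5.mp h).imp id Or.inr
            · intro h; rcases h with h | h | h
              exacts [h5.mpr (Or.inl h), absurd hx (by omega), h5.mpr (Or.inr h)]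
          · constructor
            · intro _; exact Or.inr (Or.inl hx)
            · intro _; exact h6.mpr (Or.inl (by omega))
    · -- x = 0 : nothing changes
      subst hx
      simp only [if_neg (by omega : ¬ (0:Int) > 0)]
      rw [if_neg (by omega)]
      rcases ih p n hp hn hpn with ⟨h1, h2, h3⟩ | ⟨p', n', h1, h2, h3, h4, h5, h6⟩
      · exact Or.inl ⟨h1, h2.imp id Or.inr, h3.imp id Or.inr⟩
      · refine Or.inr ⟨p', n', h1, h2, h3, h4, ?_, ?_⟩
        · rw [h5]; constructor
          · intro h; exact h.imp id Or.inr
          · intro h; rcases h with h | h | h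
            exacts [Or.inl h, absurd h (by omega), Or.inr h]
        · rw [h6]; constructor
          · intro h; exact h.imp id Or.inr
          · intro h; rcases h with h | h | h
            exacts [Or.inl h, absurd h (by omega), Or.inr h]
    · -- 0 < x : positive counter bumps
      simp only [if_pos (by omega : x > 0), if_neg (by omega : ¬ x < 0)]
      by_cases hN : 1 ≤ n
      · rw [if_pos ⟨hN, by omega⟩]
        exact Or.inl ⟨rfl, Or.inr (Or.inl hx), Or.inl hN⟩
      · rw [if_neg (by omega)]
        rcases ih (p + 1) n (by omega) hn (Or.inr (by omega)) with
          ⟨h1, h2, h3⟩ | ⟨p', n', h1, h2, h3, h4, h5, h6⟩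
        · exact Or.inl ⟨h1, Or.inr (Or.inl hx), h3.imp id Or.inr⟩
        · refine Or.inr ⟨p', n', h1, h2, h3, h4, ?_, ?_⟩
          · constructor
            · intro _; exact Or.inr (Or.inl hx)
            · intro _; exact h5.mpr (Or.inl (by omega))
          · constructor
            · intro h; exact (h6.mp h).imp id Or.inr
            · intro h; rcases h with h | h | h
              exacts [h6.mpr (Or.inl h), absurd hx (by omega), h6.mpr (Or.inr h)]

-- the outer loop returns true exactly when a positive and a negative are available
theorem pvRowsA_spec (rs : List (List Int)) (p n : Int) (hp : 0 ≤ p) (hn : 0 ≤ n)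
    (hpn : p = 0 ∨ n = 0) :
    (pvRowsA rs p n = true) ↔
      ((1 ≤ p ∨ ∃ r ∈ rs, ∃ y ∈ r, 0 < y) ∧ (1 ≤ n ∨ ∃ r ∈ rs, ∃ y ∈ r, y < 0)) := by
  induction rs generalizing p n with
  | nil =>
    simp only [pvRowsA, List.not_mem_nil]
    constructor
    · intro h; cases h
    · rintro ⟨h1, h2⟩; rcases hpn with h | h <;> subst h <;>
        [rcases h1 with h1 | ⟨_, h, _⟩; rcases h2 with h2 | ⟨_, h, _⟩] <;> first | omega | cases h
  | cons r rs ih =>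
    simp only [pvRowsA, List.mem_cons, exists_eq_or_imp]
    rcases pvCellsA_spec r p n hp hn hpn with ⟨h1, h2, h3⟩ | ⟨p', n', h1, h2, h3, h4, h5, h6⟩
    · rw [h1]; simp only [true_iff]; exact ⟨h2.imp id Or.inl, h3.imp id Or.inl⟩
    · rw [h1]
      rw [ih p' n' h2 h3 h4, h5, h6, or_assoc, or_assoc]

-- ===== VERDICT (by name: the statement is the Claim_ definition above) =====
theorem temPositivosENegativos_spec : Claim_equal_temPositivosENegativos := by
  intro matriz _
  unfold Spec_temPositivosENegativos temPositivosENegativos temPositivosENegativos_alt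
  rw [Bool.eq_iff_iff]
  rw [pvRowsA_spec matriz 0 0 le_rfl le_rfl (Or.inl rfl)]
  simp
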